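-- pv_equiv track=rewrite | github.com/Palmerschallon/bloom-head-surgery | surgery/train_1b7_baseline.py | count_waking
-- ===== SOURCE A (Python) =====
-- def count_waking(analysis, baseline, surgery):
--     woke = 0
--     still_sick = 0
--     per_layer = {}
--     for li in sorted(surgery.keys()):
--         targets = surgery[li]['reinit']
--         layer_woke = 0
--         layer_sick = 0
--         for h in targets:
--             cp = analysis[li][h]['pattern']
--             if cp in ('local', 'distributed'):
--                 woke += 1
--                 layer_woke += 1
--             else:
--                 still_sick += 1
--                 layer_sick += 1
--         per_layer[li] = (layer_woke, len(targets))
--     return woke, still_sick, per_layer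
-- ===== SOURCE B (Python) =====
-- def count_waking(analysis, baseline, surgery):
--     # Stage 1: flatten the whole surgery plan into one record list (layer, is_awake).
--     flat = [(li, analysis[li][h]['pattern'] in ('local', 'distributed'))
--             for li in sorted(surgery)
--             for h in surgery[li]['reinit']]
--     # Stage 2: global totals straight off the flat record list.
--     woke = sum(1 for _, ok in flat if ok)
--     still_sick = len(flat) - woke
--     # Stage 3: per-layer table by scanning the flat record list for each layer.
--     per_layer = {li: (sum(1 for l, ok in flat if l == li and ok),
--                       sum(1 for l, _ in flat if l == li))
--                  for li in sorted(surgery)}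
--     return woke, still_sick, per_layer
-- ===== Notes on version B (the rewrite author's own statement) =====
-- stated objective: alternative
-- what changed: Replaces A's interleaved per-layer counter loop with a flatten-then-reduce design: first materialize one flat record list of (layer, is_awake) pairs across all targeted heads, then compute the global totals and each per-layer entry by independent scans/counts over that flat list instead of accumulating counters while walking the nested structure.
import Mathlib
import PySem

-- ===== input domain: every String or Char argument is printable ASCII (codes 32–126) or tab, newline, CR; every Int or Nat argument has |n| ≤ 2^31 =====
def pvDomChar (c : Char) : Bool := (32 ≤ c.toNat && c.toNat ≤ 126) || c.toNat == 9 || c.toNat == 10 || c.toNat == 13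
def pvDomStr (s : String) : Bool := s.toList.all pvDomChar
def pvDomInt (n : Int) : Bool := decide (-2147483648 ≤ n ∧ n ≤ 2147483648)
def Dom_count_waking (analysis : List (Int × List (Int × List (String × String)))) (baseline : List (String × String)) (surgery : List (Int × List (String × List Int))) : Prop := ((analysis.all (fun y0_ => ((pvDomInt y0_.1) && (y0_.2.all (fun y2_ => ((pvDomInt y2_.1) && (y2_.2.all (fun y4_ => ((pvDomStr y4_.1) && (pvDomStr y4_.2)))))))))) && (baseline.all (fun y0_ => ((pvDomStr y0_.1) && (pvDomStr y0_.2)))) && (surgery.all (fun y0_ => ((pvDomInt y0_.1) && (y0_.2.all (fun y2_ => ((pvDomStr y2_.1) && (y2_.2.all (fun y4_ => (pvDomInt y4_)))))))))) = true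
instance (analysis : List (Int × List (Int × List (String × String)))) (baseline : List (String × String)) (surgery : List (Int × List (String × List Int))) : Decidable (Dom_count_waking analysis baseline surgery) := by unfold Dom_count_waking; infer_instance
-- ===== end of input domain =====

-- B replaces A's interleaved counter loop by a flatten-then-reduce design (one flat record
-- list, then independent counting scans over it); alternative structure, not faster.

-- shared lookup expressions of both Pythons: surgery[li]['reinit'] and analysis[li][h]['pattern']
def pyTargets (surgery : List (Int × List (String × List Int))) (li : Int) : List Int :=
  (PySem.Dict.ofList ((PySem.Dict.ofList surgery).getD li [])).getD "reinit" []
def pyPattern (analysis : List (Int × List (Int × List (String × String)))) (li h : Int) : String :=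
  (PySem.Dict.ofList ((PySem.Dict.ofList ((PySem.Dict.ofList analysis).getD li [])).getD h [])).getD "pattern" ""

-- ===== PORT A =====
-- A's outer loop body: four interleaved counters (woke, still_sick, layer_woke, layer_sick)
def pyStepA (analysis : List (Int × List (Int × List (String × String)))) (surgery : List (Int × List (String × List Int)))
    (acc : Int × Int × PySem.Dict Int (Int × Int)) (li : Int) : Int × Int × PySem.Dict Int (Int × Int) :=
  let targets := pyTargets surgery li
  let inner := targets.foldl
    (fun (l : Int × Int × Int × Int) h =>
      let cp := pyPattern analysis li h
      if cp == "local" || cp == "distributed" then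
        (l.1 + 1, l.2.1, l.2.2.1 + 1, l.2.2.2)
      else
        (l.1, l.2.1 + 1, l.2.2.1, l.2.2.2 + 1))
    (acc.1, acc.2.1, 0, 0)
  (inner.1, inner.2.1, acc.2.2.insert li (inner.2.2.1, PySem.List.len targets))

def count_waking (analysis : List (Int × List (Int × List (String × String)))) (baseline : List (String × String)) (surgery : List (Int × List (String × List Int))) : Int × Int × (List (Int × Int × Int)) :=
  let st := (PySem.List.sorted (PySem.Dict.ofList surgery).keys (fun x => x) false).foldl
    (pyStepA analysis surgery) (0, 0, PySem.Dict.empty)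
  (st.1, st.2.1, st.2.2.items.map (fun p => (p.1, p.2.1, p.2.2)))

-- ===== PORT B =====
-- B's stage-1 flat record list: (layer, is_awake) for every targeted head
def pyFlat (analysis : List (Int × List (Int × List (String × String)))) (surgery : List (Int × List (String × List Int)))
    (ks : List Int) : List (Int × Bool) :=
  ks.flatMap (fun li => (pyTargets surgery li).map
    (fun h => (li, (pyPattern analysis li h == "local" || pyPattern analysis li h == "distributed"))))

def count_waking_alt (analysis : List (Int × List (Int × List (String × String)))) (baseline : List (String × String)) (surgery : List (Int × List (String × List Int))) : Int × Int × (List (Int × Int × Int)) :=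
  let ks := PySem.List.sorted (PySem.Dict.ofList surgery).keys (fun x => x) false
  let flat := pyFlat analysis surgery ks
  let woke : Int := PySem.List.len (flat.filter (fun p => p.2))
  let still_sick : Int := PySem.List.len flat - woke
  let per_layer := ks.foldl (fun (d : PySem.Dict Int (Int × Int)) li =>
      d.insert li (PySem.List.len (flat.filter (fun p => p.1 == li && p.2)),
                   PySem.List.len (flat.filter (fun p => p.1 == li)))) PySem.Dict.empty
  (woke, still_sick, per_layer.items.map (fun p => (p.1, p.2.1, p.2.2)))

-- ===== PRECONDITION & SPEC =====
-- Pre_ excludes exactly the inputs where the Python raises KeyError: a surgery layer without a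
-- 'reinit' entry, a layer or head missing from analysis, or a head entry without 'pattern'.
def Pre_count_waking (analysis : List (Int × List (Int × List (String × String)))) (baseline : List (String × String)) (surgery : List (Int × List (String × List Int))) : Prop :=
  ∀ li ∈ (PySem.Dict.ofList surgery).keys,
    (PySem.Dict.ofList ((PySem.Dict.ofList surgery).getD li [])).contains "reinit" = true ∧
    (PySem.Dict.ofList analysis).contains li = true ∧
    ∀ h ∈ (PySem.Dict.ofList ((PySem.Dict.ofList surgery).getD li [])).getD "reinit" [],
      (PySem.Dict.ofList ((PySem.Dict.ofList analysis).getD li [])).contains h = true ∧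
      (PySem.Dict.ofList ((PySem.Dict.ofList ((PySem.Dict.ofList analysis).getD li [])).getD h [])).contains "pattern" = true
instance (analysis : List (Int × List (Int × List (String × String)))) (baseline : List (String × String)) (surgery : List (Int × List (String × List Int))) : Decidable (Pre_count_waking analysis baseline surgery) := by unfold Pre_count_waking; infer_instance
def pvWitness_count_waking : (List (Int × List (Int × List (String × String)))) × (List (String × String)) × (List (Int × List (String × List Int))) :=
  ([(0, [(0, [("pattern", "local")]), (1, [("pattern", "dead")])])], [], [(0, [("reinit", [0, 1])])])
def Spec_count_waking (analysis : List (Int × List (Int × List (String × String)))) (baseline : List (String × String)) (surgery : List (Int × List (String × List Int))) (out : Int × Int × (List (Int × Int × Int))) : Prop := out = count_waking_alt analysis baseline surgery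
instance (analysis : List (Int × List (Int × List (String × String)))) (baseline : List (String × String)) (surgery : List (Int × List (String × List Int))) (out : Int × Int × (List (Int × Int × Int))) : Decidable (Spec_count_waking analysis baseline surgery out) := by unfold Spec_count_waking; infer_instance

-- ===== CLAIM (what is proved, stated in full; the proofs are below) =====
def Claim_equal_count_waking : Prop := ∀ (analysis : List (Int × List (Int × List (String × String)))) (baseline : List (String × String)) (surgery : List (Int × List (String × List Int))), Dom_count_waking analysis baseline surgery → Pre_count_waking analysis baseline surgery → Spec_count_waking analysis baseline surgery (count_waking analysis baseline surgery)

-- ===== LEMMAS AND PROOFS =====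

-- the per-layer woke count and target total both programs compute
def pvC (analysis : List (Int × List (Int × List (String × String)))) (surgery : List (Int × List (String × List Int))) (li : Int) : Int :=
  ((pyTargets surgery li).countP (fun h => pyPattern analysis li h == "local" || pyPattern analysis li h == "distributed") : Int)
def pvN (surgery : List (Int × List (String × List Int))) (li : Int) : Int :=
  PySem.List.len (pyTargets surgery li)

lemma inner_foldl {α : Type} (p : α → Bool) (l : List α) (w s lw ls : Int) :
    l.foldl (fun (acc : Int × Int × Int × Int) h =>
        if p h then (acc.1 + 1, acc.2.1, acc.2.2.1 + 1, acc.2.2.2)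
        else (acc.1, acc.2.1 + 1, acc.2.2.1, acc.2.2.2 + 1)) (w, s, lw, ls)
      = (w + (l.countP p : Int), s + ((l.length : Int) - (l.countP p : Int)),
         lw + (l.countP p : Int), ls + ((l.length : Int) - (l.countP p : Int))) := by
  induction l generalizing w s lw ls with
  | nil => simp
  | cons x t ih =>
    by_cases hx : p x = true
    · simp [List.foldl_cons, hx, ih, Prod.ext_iff]
      omega
    · simp [List.foldl_cons, hx, ih, Prod.ext_iff]
      omega

lemma stepA_eval (analysis : List (Int × List (Int × List (String × String)))) (surgery : List (Int × List (String × List Int)))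
    (acc : Int × Int × PySem.Dict Int (Int × Int)) (li : Int) :
    pyStepA analysis surgery acc li
      = (acc.1 + pvC analysis surgery li, acc.2.1 + (pvN surgery li - pvC analysis surgery li),
         acc.2.2.insert li (pvC analysis surgery li, pvN surgery li)) := by
  simp only [pyStepA, inner_foldl]
  simp [pvC, pvN, PySem.List.len_eq]

lemma outer_foldl (analysis : List (Int × List (Int × List (String × String)))) (surgery : List (Int × List (String × List Int)))
    (ks : List Int) (w s : Int) (d : PySem.Dict Int (Int × Int)) :
    ks.foldl (pyStepA analysis surgery) (w, s, d)
      = (w + (ks.map (pvC analysis surgery)).sum,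
         s + (ks.map (fun li => pvN surgery li - pvC analysis surgery li)).sum,
         ks.foldl (fun d li => d.insert li (pvC analysis surgery li, pvN surgery li)) d) := by
  induction ks generalizing w s d with
  | nil => simp
  | cons li t ih =>
    rw [List.foldl_cons, stepA_eval, ih, List.foldl_cons]
    simp [Prod.ext_iff]
    exact ⟨by ring, by ring⟩

-- B stage 2: counts over the flat list decompose layerwise
lemma flat_countP_true (analysis : List (Int × List (Int × List (String × String)))) (surgery : List (Int × List (String × List Int)))
    (ks : List Int) :
    ((pyFlat analysis surgery ks).countP (fun p => p.2) : Nat)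
      = (ks.map (fun li => (pyTargets surgery li).countP (fun h => pyPattern analysis li h == "local" || pyPattern analysis li h == "distributed"))).sum := by
  induction ks with
  | nil => simp [pyFlat]
  | cons li t ih =>
    simp only [pyFlat, List.flatMap_cons, List.countP_append, List.countP_map, List.map_cons, List.sum_cons] at *
    simp [ih, Function.comp_def]

lemma flat_length (analysis : List (Int × List (Int × List (String × String)))) (surgery : List (Int × List (String × List Int)))
    (ks : List Int) :
    (pyFlat analysis surgery ks).length = (ks.map (fun li => (pyTargets surgery li).length)).sum := by
  simp [pyFlat, List.length_flatMap, Function.comp_def]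

-- a generic layer-restricted count over the flat list (q instantiated to p.2 and to true)
lemma flat_countP_not_mem (analysis : List (Int × List (Int × List (String × String)))) (surgery : List (Int × List (String × List Int)))
    (q : Bool → Bool) (li : Int) (ks : List Int) (hli : li ∉ ks) :
    (pyFlat analysis surgery ks).countP (fun p => p.1 == li && q p.2) = 0 := by
  induction ks with
  | nil => simp [pyFlat]
  | cons l' t ih =>
    have hne : l' ≠ li := fun h => hli (h ▸ List.mem_cons_self)
    have ht : li ∉ t := fun h => hli (List.mem_cons_of_mem _ h)
    simp only [pyFlat, List.flatMap_cons, List.countP_append, List.countP_map] at *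
    rw [ih ht]
    simp [Function.comp_def, hne]

lemma flat_countP_mem (analysis : List (Int × List (Int × List (String × String)))) (surgery : List (Int × List (String × List Int)))
    (q : Bool → Bool) (li : Int) (ks : List Int) (hnd : ks.Nodup) (hli : li ∈ ks) :
    (pyFlat analysis surgery ks).countP (fun p => p.1 == li && q p.2)
      = (pyTargets surgery li).countP (fun h => q (pyPattern analysis li h == "local" || pyPattern analysis li h == "distributed")) := by
  induction ks with
  | nil => simp at hli
  | cons l' t ih =>
    by_cases heq : l' = li
    · have ht : li ∉ t := heq ▸ (List.nodup_cons.mp hnd).1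
      have h0 := flat_countP_not_mem analysis surgery q li t ht
      simp only [pyFlat, List.flatMap_cons, List.countP_append, List.countP_map] at h0 ⊢
      rw [h0]
      simp [Function.comp_def, heq]
    · have ht : li ∈ t := by
        rcases List.mem_cons.mp hli with h | h
        · exact absurd h.symm heq
        · exact h
      have h1 := ih (List.nodup_cons.mp hnd).2 ht
      simp only [pyFlat, List.flatMap_cons, List.countP_append, List.countP_map] at h1 ⊢
      rw [h1]
      simp [Function.comp_def, heq]

-- ===== VERDICT (by name: the statement is the Claim_ definition above) =====
theorem count_waking_spec : Claim_equal_count_waking := by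
  intro analysis baseline surgery _ _
  show _ = _
  simp only [count_waking, count_waking_alt]
  rw [outer_foldl]
  have hkey : (PySem.List.sorted (PySem.Dict.ofList surgery).keys (fun x => x) false).Nodup :=
    (PySem.List.sorted_perm _ _ _).nodup_iff.mpr (PySem.Dict.nodup_keys_ofList surgery)
  set ks := PySem.List.sorted (PySem.Dict.ofList surgery).keys (fun x => x) false with hks
  have hfold : ks.foldl (fun (d : PySem.Dict Int (Int × Int)) li =>
      d.insert li (PySem.List.len ((pyFlat analysis surgery ks).filter (fun p => p.1 == li && p.2)),
                   PySem.List.len ((pyFlat analysis surgery ks).filter (fun p => p.1 == li)))) PySem.Dict.empty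
      = ks.foldl (fun d li => d.insert li (pvC analysis surgery li, pvN surgery li)) PySem.Dict.empty := by
    apply PySem.List.foldl_congr_mem
    intro d li hmem
    have h1 : ((pyFlat analysis surgery ks).countP (fun p => p.1 == li && p.2))
        = (pyTargets surgery li).countP (fun h => pyPattern analysis li h == "local" || pyPattern analysis li h == "distributed") := by
      have := flat_countP_mem analysis surgery (fun b => b) li ks hkey hmem
      simpa using this
    have h2 : ((pyFlat analysis surgery ks).countP (fun p => p.1 == li))
        = (pyTargets surgery li).length := by
      have := flat_countP_mem analysis surgery (fun _ => true) li ks hkey hmem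
      simpa [List.countP_true] using this
    simp only [PySem.List.len_eq, ← List.countP_eq_length_filter]
    rw [h1, h2]
    simp [pvC, pvN, PySem.List.len_eq]
  rw [hfold]
  rw [Prod.ext_iff, Prod.ext_iff]
  refine ⟨?_, ?_, rfl⟩
  · simp only [PySem.List.len_eq, ← List.countP_eq_length_filter]
    rw [flat_countP_true]
    simp [pvC, Function.comp_def]
    push_cast
    rfl
  · simp only [PySem.List.len_eq, ← List.countP_eq_length_filter]
    rw [flat_countP_true, flat_length]
    simp only [pvC, pvN, PySem.List.len_eq]
    induction ks with
    | nil => simp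
    | cons x t ih => simp at ih ⊢; omega
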